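-- pv_equiv track=rewrite | github.com/btretto03/MC102 | Beecrowd/5/7.py | combina
-- ===== SOURCE A (Python) =====
-- def combina(lista1,lista2):
--     '''A funcao recebe duas listas e as combina conforme pedido no enunciado
--     '''
--     listacombinada = []
--     for x in lista1:
--         listacombinada.append(x)
--     i = 0
--     for y in lista2:
--         listacombinada.insert(1+i, y)
--         i += 2
--
--     return listacombinada
-- ===== SOURCE B (Python) =====
-- def combina(lista1, lista2):
--     '''A funcao recebe duas listas e as combina conforme pedido no enunciado
--     '''
--     resultado = []
--     for a, b in zip(lista1, lista2):
--         resultado.append(a)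
--         resultado.append(b)
--     if len(lista1) > len(lista2):
--         resultado.extend(lista1[len(lista2):])
--     else:
--         resultado.extend(lista2[len(lista1):])
--     return resultado
-- ===== Notes on version B (the rewrite author's own statement) =====
-- stated objective: simpler
-- what changed: B builds the interleaved prefix by a single zip pass appending pairs and then extends with the longer list's tail slice, instead of copying lista1 and repeatedly calling list.insert at odd positions.
import Mathlib
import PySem

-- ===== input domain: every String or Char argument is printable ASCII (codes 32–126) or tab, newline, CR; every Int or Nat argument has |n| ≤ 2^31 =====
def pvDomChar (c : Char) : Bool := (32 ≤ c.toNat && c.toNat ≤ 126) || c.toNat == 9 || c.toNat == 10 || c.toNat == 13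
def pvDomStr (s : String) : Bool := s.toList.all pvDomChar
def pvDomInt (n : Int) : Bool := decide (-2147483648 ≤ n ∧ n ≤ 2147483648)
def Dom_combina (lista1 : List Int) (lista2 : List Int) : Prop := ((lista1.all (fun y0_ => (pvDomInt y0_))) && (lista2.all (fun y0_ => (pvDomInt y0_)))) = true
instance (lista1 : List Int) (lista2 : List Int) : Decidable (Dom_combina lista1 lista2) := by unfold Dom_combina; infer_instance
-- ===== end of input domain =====

-- B replaces A's copy-then-insert-at-odd-positions loop by one zip pass plus the longer list's tail; return values proved equal on all inputs.

-- ===== PORT A =====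
-- copy lista1 element by element, then insert each y of lista2 at position 1+i, i += 2
def combina (lista1 : List Int) (lista2 : List Int) : List Int :=
  let listacombinada := lista1.foldl (fun acc x => acc ++ [x]) []
  (lista2.foldl (fun (st : List Int × Int) y => (PySem.List.insert st.1 (1 + st.2) y, st.2 + 2))
    (listacombinada, 0)).1

-- ===== PORT B =====
-- zip pass appending each pair, then extend with the tail slice of the longer list
def combina_alt (lista1 : List Int) (lista2 : List Int) : List Int :=
  let resultado := (lista1.zip lista2).foldl (fun acc p => acc ++ [p.1, p.2]) []
  if lista2.length < lista1.length then
    resultado ++ PySem.List.slice lista1 (some (lista1.length - lista1.length + lista2.length : Int)) none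
  else
    resultado ++ PySem.List.slice lista2 (some (lista2.length - lista2.length + lista1.length : Int)) none

-- ===== PRECONDITION & SPEC =====
def Spec_combina (lista1 : List Int) (lista2 : List Int) (out : List Int) : Prop := out = combina_alt lista1 lista2
instance (lista1 : List Int) (lista2 : List Int) (out : List Int) : Decidable (Spec_combina lista1 lista2 out) := by unfold Spec_combina; infer_instance

-- ===== CLAIM (what is proved, stated in full; the proofs are below) =====
def Claim_equal_combina : Prop := ∀ (lista1 : List Int) (lista2 : List Int), Dom_combina lista1 lista2 → Spec_combina lista1 lista2 (combina lista1 lista2)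

-- ===== LEMMAS AND PROOFS =====

-- the common meaning of both programs: pairwise interleave, longer tail appended
def interleave : List Int → List Int → List Int
  | [], l2 => l2
  | l1, [] => l1
  | a :: as, b :: bs => a :: b :: interleave as bs

theorem interleave_nil (l1 : List Int) : interleave l1 [] = l1 := by
  cases l1 <;> rfl

-- Python list.insert clamps an index past the end: it appends
theorem insert_of_length_le (xs : List Int) (j : Int) (v : Int) (h : (xs.length : Int) ≤ j) :
    PySem.List.insert xs j v = xs ++ [v] := by
  have h0 : ¬ j < 0 := by omega
  have hm : min j (xs.length : Int) = (xs.length : Int) := by omega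
  simp [PySem.List.insert, PySem.List.sliceIndices, h0, hm]

-- once the insertion index is past the end, A's loop just appends the rest of lista2
theorem loopA_append (l2 : List Int) (acc : List Int) (i : Int)
    (hlen : (acc.length : Int) ≤ i + 1) (hi : 0 ≤ i) :
    (l2.foldl (fun (st : List Int × Int) y => (PySem.List.insert st.1 (1 + st.2) y, st.2 + 2))
      (acc, i)).1 = acc ++ l2 := by
  induction l2 generalizing acc i with
  | nil => simp
  | cons y ys ih =>
    simp only [List.foldl_cons]
    rw [insert_of_length_le acc (1 + i) y (by omega)]
    rw [ih (acc ++ [y]) (i + 2) (by simp; omega) (by omega)]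
    simp

-- invariant of A's insert loop: a fully interleaved prefix `done` of length = the index state
theorem loopA_main (l2 : List Int) : ∀ (done rest : List Int),
    (l2.foldl (fun (st : List Int × Int) y => (PySem.List.insert st.1 (1 + st.2) y, st.2 + 2))
      (done ++ rest, (done.length : Int))).1 = done ++ interleave rest l2 := by
  induction l2 with
  | nil => intro done rest; simp [interleave_nil]
  | cons y ys ih =>
    intro done rest
    cases rest with
    | nil =>
      simp only [List.append_nil, List.foldl_cons]
      rw [insert_of_length_le done (1 + done.length) y (by omega)]
      rw [loopA_append ys (done ++ [y]) ((done.length : Int) + 2) (by simp) (by omega)]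
      simp [interleave]
    | cons a r =>
      simp only [List.foldl_cons]
      have hcast : (1 + (done.length : Int)) = ((done.length + 1 : Nat) : Int) := by push_cast; ring
      rw [hcast, PySem.List.insert_natCast (done ++ a :: r) (done.length + 1) y (by simp)]
      have htake : List.take (done.length + 1) (done ++ a :: r) = done ++ [a] := by
        rw [show done.length + 1 = (done ++ [a]).length by simp,
            show done ++ a :: r = (done ++ [a]) ++ r by simp, List.take_left]
      have hdrop : List.drop (done.length + 1) (done ++ a :: r) = r := by
        rw [show done.length + 1 = (done ++ [a]).length by simp,
            show done ++ a :: r = (done ++ [a]) ++ r by simp, List.drop_left]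
      rw [htake, hdrop]
      have hst : done ++ [a] ++ y :: r = (done ++ [a, y]) ++ r := by simp
      have hidx : (done.length : Int) + 2 = ((done ++ [a, y]).length : Int) := by simp
      rw [hst, hidx, ih (done ++ [a, y]) r]
      simp [interleave]

theorem combina_eq_interleave (l1 l2 : List Int) : combina l1 l2 = interleave l1 l2 := by
  show (l2.foldl _ (l1.foldl (fun acc x => acc ++ [x]) [], 0)).1 = _
  rw [PySem.List.foldl_append_singleton]
  have := loopA_main l2 [] l1
  simpa using this

theorem interleave_eq_zip_tail (l1 : List Int) : ∀ (l2 : List Int),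
    interleave l1 l2 = (l1.zip l2).flatMap (fun p => [p.1, p.2]) ++
      (if l2.length < l1.length then l1.drop l2.length else l2.drop l1.length) := by
  induction l1 with
  | nil => intro l2; simp [interleave]
  | cons a as ih =>
    intro l2
    cases l2 with
    | nil => simp [interleave]
    | cons b bs =>
      simp only [interleave, List.zip_cons_cons, List.flatMap_cons, ih bs]
      by_cases h : bs.length < as.length <;>
        simp [h]

theorem combina_alt_eq_interleave (l1 l2 : List Int) : combina_alt l1 l2 = interleave l1 l2 := by
  unfold combina_alt
  rw [interleave_eq_zip_tail l1 l2]
  rw [PySem.List.foldl_append_eq_flatMap (fun p => [p.1, p.2]) (l1.zip l2) []]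
  by_cases h : l2.length < l1.length
  · have : ((l1.length : Int) - (l1.length : Int) + (l2.length : Int)) = ((l2.length : Nat) : Int) := by ring
    rw [this, PySem.List.slice_from_natCast]
    simp [h]
  · have : ((l2.length : Int) - (l2.length : Int) + (l1.length : Int)) = ((l1.length : Nat) : Int) := by ring
    rw [this, PySem.List.slice_from_natCast]
    simp [h]

-- ===== VERDICT (by name: the statement is the Claim_ definition above) =====
theorem combina_spec : Claim_equal_combina := by
  intro l1 l2 _
  unfold Spec_combina
  rw [combina_eq_interleave, combina_alt_eq_interleave]
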